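-- pv_equiv track=rewrite | github.com/lotooo/adventofcode | 2021/10/test2.py | solve
-- ===== SOURCE A (Python) =====
-- closing_characters = {
--     ')': 1,
--     ']': 2,
--     '}': 3,
--     '>': 4
-- }
--
-- opening_characters = {
--     '(': 1,
--     '[': 2,
--     '{': 3,
--     '<': 4
-- }
--
-- def solve(data):
--     """ Solve the puzzle and return the solution """
--     scores = []
--     for line in data:
--         score = 0
--         last_size = 0
--         chunks = line
--         while last_size != len(line):
--             last_size = len(line)
--             line = line.replace('<>','').replace('[]','').replace('{}','').replace('()','')
--         if any(map(lambda x: x in closing_characters, line)):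
--             # corrupted
--             continue
--         for i in line[::-1]:
--             if i in opening_characters:
--                 score = (5 * score) + opening_characters[i]
--         scores.append(score)
--     return sorted(scores)[len(scores)//2]
-- ===== SOURCE B (Python) =====
-- # Single stack-based matching pass per line instead of A's repeated
-- # whole-line str.replace fixpoint loop.
-- closers = {')': '(', ']': '[', '}': '{', '>': '<'}
-- points = {'(': 1, '[': 2, '{': 3, '<': 4}
--
-- def solve(data):
--     """ Solve the puzzle and return the solution """
--     scores = []
--     for line in data:
--         stack = []
--         for c in line:
--             if c in closers and stack and stack[-1] == closers[c]:
--                 stack.pop()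
--             else:
--                 stack.append(c)
--         if any(c in closers for c in stack):
--             # corrupted
--             continue
--         score = 0
--         for c in reversed(stack):
--             if c in points:
--                 score = 5 * score + points[c]
--         scores.append(score)
--     scores.sort()
--     return scores[len(scores) // 2]
-- ===== Notes on version B (the rewrite author's own statement) =====
-- stated objective: alternative
-- what changed: Per line, A repeatedly rebuilds the whole string with four str.replace passes until a fixpoint; B does one stack-based pass that pops a matching adjacent opener, then scores the leftover stack.
import Mathlib
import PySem

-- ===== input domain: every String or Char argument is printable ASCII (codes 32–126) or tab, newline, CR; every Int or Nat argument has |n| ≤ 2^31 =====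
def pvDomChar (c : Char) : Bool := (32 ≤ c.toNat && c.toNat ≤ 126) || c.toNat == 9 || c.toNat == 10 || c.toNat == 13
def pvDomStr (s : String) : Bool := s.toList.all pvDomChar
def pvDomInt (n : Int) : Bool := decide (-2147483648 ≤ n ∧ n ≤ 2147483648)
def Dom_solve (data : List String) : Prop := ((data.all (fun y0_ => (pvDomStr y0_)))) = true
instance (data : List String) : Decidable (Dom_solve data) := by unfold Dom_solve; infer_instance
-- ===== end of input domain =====

-- B replaces A's repeated whole-line str.replace fixpoint loop by a single
-- stack-based pass per line; same middle completion score.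

-- ===== PORT A =====
-- the two module-level dicts of A
def closersA : PySem.Dict Char Int :=
  PySem.Dict.ofList [((')' : Char), (1 : Int)), (']', 2), ('}', 3), ('>', 4)]
def openersA : PySem.Dict Char Int :=
  PySem.Dict.ofList [(('(' : Char), (1 : Int)), ('[', 2), ('{', 3), ('<', 4)]

-- str.replace can only shrink the string when the replacement is '' (used by the
-- while-loop's termination argument)
theorem chars_replace_go_len (pat : List Char) (fuel : Nat) :
    ∀ (l acc : List Char),
      (PySem.Chars.replace.go pat [] fuel l acc).length ≤ acc.length + l.length := by
  induction fuel with
  | zero =>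
      intro l acc
      simp [PySem.Chars.replace.go]
  | succ fuel ih =>
      intro l acc
      cases l with
      | nil => simp [PySem.Chars.replace.go]
      | cons c t =>
          rw [PySem.Chars.replace.go]
          split
          · calc (PySem.Chars.replace.go pat [] fuel (List.drop pat.length (c :: t))
                  (List.reverse [] ++ acc)).length
                ≤ (List.reverse [] ++ acc).length + (List.drop pat.length (c :: t)).length := ih _ _
              _ ≤ acc.length + (c :: t).length := by
                  simp only [List.reverse_nil, List.nil_append, List.length_drop,
                    List.length_cons]
                  omega
          · calc (PySem.Chars.replace.go pat [] fuel t (c :: acc)).length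
                ≤ (c :: acc).length + t.length := ih _ _
              _ ≤ acc.length + (c :: t).length := by simp; omega

theorem chars_replace_len (l pat : List Char) :
    (PySem.Chars.replace l pat []).length ≤ l.length := by
  rw [PySem.Chars.replace]
  split
  · next h =>
      have : pat = [] := by simpa [List.isEmpty_iff] using h
      simp
  · simpa using chars_replace_go_len pat l.length l []

-- one pass of A's loop body: the four chained .replace('..','') calls
def rep4 (line : List Char) : List Char :=
  PySem.Chars.replace
    (PySem.Chars.replace
      (PySem.Chars.replace
        (PySem.Chars.replace line ['<', '>'] []) ['[', ']'] []) ['{', '}'] []) ['(', ')'] []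

theorem rep4_len (line : List Char) : (rep4 line).length ≤ line.length := by
  unfold rep4
  calc (PySem.Chars.replace _ ['(', ')'] []).length ≤ _ := chars_replace_len _ _
    _ ≤ _ := chars_replace_len _ _
    _ ≤ _ := chars_replace_len _ _
    _ ≤ _ := chars_replace_len _ _

-- A's while loop: strip adjacent '<>', '[]', '{}', '()' until the length stops changing
def reduceA (line : List Char) : List Char :=
  if (rep4 line).length = line.length then rep4 line else reduceA (rep4 line)
termination_by line.length
decreasing_by
  have h := rep4_len line
  omega

def solve (data : List String) : Int :=
  let scores := data.foldl (fun scores line =>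
    let f := reduceA line.toList
    -- any(map(lambda x: x in closing_characters, line))
    if (f.map (fun x => PySem.Dict.contains closersA x)).any (fun b => b) then scores
    else
      -- for i in line[::-1]: if i in opening_characters: score = 5*score + opening_characters[i]
      let rev := (PySem.List.slice? f none none (-1)).getD []
      let score := rev.foldl (fun score i =>
        if PySem.Dict.contains openersA i then
          5 * score + (PySem.Dict.get? openersA i).getD 0
        else score) 0
      scores ++ [score]) []
  -- sorted(scores)[len(scores)//2]  (IndexError on empty scores is excluded by Pre_)
  (PySem.List.pyGet? (PySem.List.sorted scores (fun x => x) false)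
    (PySem.Int.floordiv (scores.length : Int) 2)).getD 0

-- ===== PORT B =====
def closersB : PySem.Dict Char Char :=
  PySem.Dict.ofList [((')' : Char), ('(' : Char)), (']', '['), ('}', '{'), ('>', '<')]
def pointsB : PySem.Dict Char Int :=
  PySem.Dict.ofList [(('(' : Char), (1 : Int)), ('[', 2), ('{', 3), ('<', 4)]

-- one step of B's stack loop (stack kept head-first = top-first, i.e. Python's reversed(stack))
def stepB (st : List Char) (c : Char) : List Char :=
  match PySem.Dict.get? closersB c with
  | some o =>
      match st with
      | t :: rest => if t == o then rest else c :: t :: rest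
      | [] => c :: st
  | none => c :: st

def solve_alt (data : List String) : Int :=
  let scores := data.foldl (fun scores line =>
    let st := line.toList.foldl stepB []
    if st.any (fun c => PySem.Dict.contains closersB c) then scores
    else
      scores ++ [st.foldl (fun score c =>
        match PySem.Dict.get? pointsB c with
        | some v => 5 * score + v
        | none => score) 0]) []
  let sortedScores := PySem.List.sorted scores (fun x => x) false
  (PySem.List.pyGet? sortedScores (PySem.Int.floordiv (scores.length : Int) 2)).getD 0

-- ===== PRECONDITION & SPEC =====
-- Pre_ excludes exactly the inputs on which A raises IndexError: every line
-- corrupted (or no lines at all), so scores is empty and sorted(scores)[0] raises.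
def Pre_solve (data : List String) : Prop :=
  (data.any (fun line =>
    (line.toList.foldl stepB []).all (fun c => !(PySem.Dict.contains closersB c)))) = true
instance (data : List String) : Decidable (Pre_solve data) := by unfold Pre_solve; infer_instance

def pvWitness_solve : List String := ["<({"]

def Spec_solve (data : List String) (out : Int) : Prop := out = solve_alt data
instance (data : List String) (out : Int) : Decidable (Spec_solve data out) := by
  unfold Spec_solve; infer_instance

-- ===== CLAIM (what is proved, stated in full; the proofs are below) =====
def Claim_equal_solve : Prop :=
  ∀ (data : List String), Dom_solve data → Pre_solve data → Spec_solve data (solve data)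

-- ===== LEMMAS AND PROOFS =====

-- the four matched pairs, as facts about B's dict
theorem closersB_cases (c o : Char) (h : PySem.Dict.get? closersB c = some o) :
    (o = '(' ∧ c = ')') ∨ (o = '[' ∧ c = ']') ∨ (o = '{' ∧ c = '}') ∨ (o = '<' ∧ c = '>') := by
  have hB : closersB
      = { items := [((')' : Char), ('(' : Char)), (']', '['), ('}', '{'), ('>', '<')] } := rfl
  rw [hB] at h
  repeat rw [PySem.Dict.get?_mk_cons] at h
  split_ifs at h with h1 h2 h3 h4
  · exact Or.inl ⟨(Option.some.inj h).symm, (eq_of_beq h1).symm⟩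
  · exact Or.inr (Or.inl ⟨(Option.some.inj h).symm, (eq_of_beq h2).symm⟩)
  · exact Or.inr (Or.inr (Or.inl ⟨(Option.some.inj h).symm, (eq_of_beq h3).symm⟩))
  · exact Or.inr (Or.inr (Or.inr ⟨(Option.some.inj h).symm, (eq_of_beq h4).symm⟩))
  · simp [PySem.Dict.get?] at h

theorem stepB_push (st : List Char) (c : Char) (h : PySem.Dict.get? closersB c = none) :
    stepB st c = c :: st := by
  simp [stepB, h]

theorem foldl_stepB_pair (o c : Char) (hc : PySem.Dict.get? closersB c = some o)
    (ho : PySem.Dict.get? closersB o = none) (r st : List Char) :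
    List.foldl stepB st (o :: c :: r) = List.foldl stepB st r := by
  simp [List.foldl, stepB, hc, ho]

-- pulling the accumulator out of Chars.replace.go (replacement = '')
theorem go_acc (pat : List Char) (fuel : Nat) :
    ∀ (l acc : List Char),
      PySem.Chars.replace.go pat [] fuel l acc
        = acc.reverse ++ PySem.Chars.replace.go pat [] fuel l [] := by
  induction fuel with
  | zero => intro l acc; simp [PySem.Chars.replace.go]
  | succ fuel ih =>
      intro l acc
      cases l with
      | nil => simp [PySem.Chars.replace.go]
      | cons ch t =>
          rw [PySem.Chars.replace.go, PySem.Chars.replace.go]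
          split
          · simp [ih _ acc]
          · rw [ih t (ch :: acc), ih t [ch]]
            simp

-- deleting adjacent matched pairs is invisible to B's stack
theorem go_foldl (o c : Char) (hc : PySem.Dict.get? closersB c = some o)
    (ho : PySem.Dict.get? closersB o = none) (fuel : Nat) :
    ∀ (l st : List Char),
      List.foldl stepB st (PySem.Chars.replace.go [o, c] [] fuel l [])
        = List.foldl stepB st l := by
  induction fuel with
  | zero => intro l st; simp [PySem.Chars.replace.go]
  | succ fuel ih =>
      intro l st
      cases l with
      | nil => simp [PySem.Chars.replace.go]
      | cons ch t =>
          rw [PySem.Chars.replace.go]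
          split
          · next hp =>
              cases t with
              | nil => simp [List.isPrefixOf] at hp
              | cons c2 t2 =>
                  simp [List.isPrefixOf] at hp
                  have hp1 := hp.1
                  have hp2 := hp.2
                  subst hp1
                  subst hp2
                  simp only [List.length_cons, List.length_nil, List.drop_succ_cons,
                    List.drop_zero, List.reverse_nil, List.nil_append, Nat.zero_add,
                    Nat.reduceAdd]
                  rw [foldl_stepB_pair o c hc ho]
                  simpa using ih t2 st
          · rw [go_acc]
            simp only [List.reverse_cons, List.reverse_nil, List.nil_append,
              List.singleton_append, List.foldl_cons]
            exact ih t (stepB st ch)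

theorem replace_foldl (o c : Char) (hc : PySem.Dict.get? closersB c = some o)
    (ho : PySem.Dict.get? closersB o = none) (l st : List Char) :
    List.foldl stepB st (PySem.Chars.replace l [o, c] []) = List.foldl stepB st l := by
  rw [PySem.Chars.replace]
  simpa using go_foldl o c hc ho l.length l st

-- a length-preserving replace was a no-op, and witnesses that the pattern does not occur
theorem go_eq_self (pat : List Char) (hpat : pat ≠ []) (fuel : Nat) :
    ∀ (l : List Char), l.length ≤ fuel →
      (PySem.Chars.replace.go pat [] fuel l []).length = l.length →
      PySem.Chars.replace.go pat [] fuel l [] = l ∧ ¬ pat <:+: l := by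
  induction fuel with
  | zero =>
      intro l hl _
      have : l = [] := List.length_eq_zero_iff.mp (Nat.le_zero.mp hl)
      subst this
      simp [PySem.Chars.replace.go, List.infix_nil, hpat]
  | succ fuel ih =>
      intro l hl hlen
      cases l with
      | nil => simp [PySem.Chars.replace.go, List.infix_nil, hpat]
      | cons ch t =>
          rw [PySem.Chars.replace.go] at hlen ⊢
          by_cases hp : pat.isPrefixOf (ch :: t) = true
          · exfalso
            rw [if_pos hp] at hlen
            have hle := chars_replace_go_len pat fuel (List.drop pat.length (ch :: t))
              (List.reverse [] ++ [])
            have hplen : 1 ≤ pat.length := by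
              cases pat with
              | nil => exact absurd rfl hpat
              | cons a b => simp
            simp only [List.reverse_nil, List.nil_append, List.length_nil, List.length_drop,
              List.length_cons, Nat.zero_add] at hle hlen
            omega
          · rw [if_neg hp] at hlen ⊢
            rw [go_acc] at hlen ⊢
            simp only [List.reverse_cons, List.reverse_nil, List.nil_append,
              List.singleton_append, List.length_cons] at hlen ⊢
            have ht : t.length ≤ fuel := by simpa using Nat.succ_le_succ_iff.mp hl
            obtain ⟨heq, hnin⟩ := ih t ht (by omega)
            refine ⟨by rw [heq], ?_⟩
            intro hin
            rcases List.infix_cons_iff.mp hin with hpre | hinf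
            · exact hp (List.isPrefixOf_iff_prefix.mpr hpre)
            · exact hnin hinf

theorem replace_eq_self (pat : List Char) (hpat : pat ≠ []) (l : List Char)
    (h : (PySem.Chars.replace l pat []).length = l.length) :
    PySem.Chars.replace l pat [] = l ∧ ¬ pat <:+: l := by
  rw [PySem.Chars.replace] at h ⊢
  have hne : pat.isEmpty = false := by simpa [List.isEmpty_iff] using hpat
  rw [hne] at h ⊢
  simp at h ⊢
  exact go_eq_self pat hpat l.length l le_rfl h

-- normal form: no adjacent matched pair remains
def isNF (l : List Char) : Prop :=
  ∀ o c : Char, PySem.Dict.get? closersB c = some o → ¬ [o, c] <:+: l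

-- on a string in normal form, B's stack never pops: the stack is the whole string reversed
theorem foldl_stepB_of_NF :
    ∀ (r st : List Char), isNF (st.reverse ++ r) →
      List.foldl stepB st r = r.reverse ++ st := by
  intro r
  induction r with
  | nil => intro st _; simp
  | cons c r' ih =>
      intro st hnf
      have hstep : stepB st c = c :: st := by
        cases hg : PySem.Dict.get? closersB c with
        | none => exact stepB_push st c hg
        | some o =>
            cases st with
            | nil => simp [stepB, hg]
            | cons t st' =>
                by_cases hto : t = o
                · exfalso
                  subst hto
                  apply hnf t c hg
                  exact ⟨st'.reverse, r', by simp⟩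
                · simp [stepB, hg, hto]
      rw [List.foldl_cons, hstep]
      rw [ih (c :: st) (by simpa using hnf)]
      simp

-- one pass of A's loop body is invisible to B's stack
theorem rep4_foldl (l st : List Char) :
    List.foldl stepB st (rep4 l) = List.foldl stepB st l := by
  unfold rep4
  rw [replace_foldl '(' ')' rfl rfl, replace_foldl '{' '}' rfl rfl,
    replace_foldl '[' ']' rfl rfl, replace_foldl '<' '>' rfl rfl]

-- A's fixpoint loop computes exactly B's stack, reversed
theorem reduceA_spec (l : List Char) :
    (∀ st, List.foldl stepB st (reduceA l) = List.foldl stepB st l) ∧ isNF (reduceA l) := by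
  induction l using reduceA.induct with
  | case1 l h =>
      rw [reduceA, if_pos h]
      -- a length-preserving pass was a no-op: each stage kept the length
      have e1 := chars_replace_len l ['<', '>']
      have e2 := chars_replace_len (PySem.Chars.replace l ['<', '>'] []) ['[', ']']
      have e3 := chars_replace_len
        (PySem.Chars.replace (PySem.Chars.replace l ['<', '>'] []) ['[', ']'] []) ['{', '}']
      have e4 := chars_replace_len
        (PySem.Chars.replace
          (PySem.Chars.replace (PySem.Chars.replace l ['<', '>'] []) ['[', ']'] [])
          ['{', '}'] []) ['(', ')']
      have hr : (rep4 l).length = l.length := h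
      unfold rep4 at hr
      obtain ⟨q1, n1⟩ := replace_eq_self ['<', '>'] (by simp) l (by omega)
      rw [q1] at hr e2 e3 e4
      obtain ⟨q2, n2⟩ := replace_eq_self ['[', ']'] (by simp) l (by omega)
      rw [q2] at hr e3 e4
      obtain ⟨q3, n3⟩ := replace_eq_self ['{', '}'] (by simp) l (by omega)
      rw [q3] at hr e4
      obtain ⟨q4, n4⟩ := replace_eq_self ['(', ')'] (by simp) l (by omega)
      have hid : rep4 l = l := by unfold rep4; rw [q1, q2, q3, q4]
      rw [hid]
      refine ⟨fun st => rfl, ?_⟩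
      intro o c hg hin
      rcases closersB_cases c o hg with ⟨rfl, rfl⟩ | ⟨rfl, rfl⟩ | ⟨rfl, rfl⟩ | ⟨rfl, rfl⟩
      · exact n4 hin
      · exact n2 hin
      · exact n3 hin
      · exact n1 hin
  | case2 l h ih =>
      rw [reduceA, if_neg h]
      refine ⟨fun st => ?_, ih.2⟩
      rw [ih.1 st, rep4_foldl]

theorem reduceA_eq (line : List Char) :
    reduceA line = (line.foldl stepB []).reverse := by
  obtain ⟨hf, hnf⟩ := reduceA_spec line
  have h1 : List.foldl stepB [] (reduceA line) = (reduceA line).reverse ++ [] :=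
    foldl_stepB_of_NF (reduceA line) [] (by simpa using hnf)
  have h2 := hf []
  rw [h1] at h2
  simp at h2
  rw [← h2, List.reverse_reverse]

-- the membership tests of the two sides agree
theorem contains_eq (c : Char) :
    PySem.Dict.contains closersA c = PySem.Dict.contains closersB c := rfl

-- `i in d` is `d.get? i` being some
theorem dict_contains_isSome {ν : Type} (d : PySem.Dict Char ν) (c : Char) :
    PySem.Dict.contains d c = (PySem.Dict.get? d c).isSome := by
  simp only [PySem.Dict.contains, PySem.Dict.get?, Option.isSome_map, List.isSome_find?]

-- the two scoring folds agree
theorem score_fold_eq (l : List Char) (s : Int) :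
    l.foldl (fun score i =>
      if PySem.Dict.contains openersA i then
        5 * score + (PySem.Dict.get? openersA i).getD 0
      else score) s
      = l.foldl (fun score c =>
          match PySem.Dict.get? pointsB c with
          | some v => 5 * score + v
          | none => score) s := by
  have hAB : openersA = pointsB := rfl
  have hfun : (fun (score : Int) (i : Char) =>
      if PySem.Dict.contains openersA i then
        5 * score + (PySem.Dict.get? openersA i).getD 0
      else score)
      = (fun (score : Int) (c : Char) =>
          match PySem.Dict.get? pointsB c with
          | some v => 5 * score + v
          | none => score) := by
    funext score c
    rw [hAB, dict_contains_isSome]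
    cases PySem.Dict.get? pointsB c <;> simp
  rw [hfun]

theorem scores_eq (data : List String) (acc : List Int) :
    data.foldl (fun scores line =>
      let f := reduceA line.toList
      if (f.map (fun x => PySem.Dict.contains closersA x)).any (fun b => b) then scores
      else
        let rev := (PySem.List.slice? f none none (-1)).getD []
        let score := rev.foldl (fun score i =>
          if PySem.Dict.contains openersA i then
            5 * score + (PySem.Dict.get? openersA i).getD 0
          else score) 0
        scores ++ [score]) acc
    = data.foldl (fun scores line =>
        let st := line.toList.foldl stepB []
        if st.any (fun c => PySem.Dict.contains closersB c) then scores
        else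
          scores ++ [st.foldl (fun score c =>
            match PySem.Dict.get? pointsB c with
            | some v => 5 * score + v
            | none => score) 0]) acc := by
  induction data generalizing acc with
  | nil => rfl
  | cons line rest ih =>
      simp only [List.foldl_cons]
      rw [show (let f := reduceA line.toList
          if (f.map (fun x => PySem.Dict.contains closersA x)).any (fun b => b) then acc
          else
            let rev := (PySem.List.slice? f none none (-1)).getD []
            let score := rev.foldl (fun score i =>
              if PySem.Dict.contains openersA i then
                5 * score + (PySem.Dict.get? openersA i).getD 0
              else score) 0
            acc ++ [score])
          = (let st := line.toList.foldl stepB []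
             if st.any (fun c => PySem.Dict.contains closersB c) then acc
             else
               acc ++ [st.foldl (fun score c =>
                 match PySem.Dict.get? pointsB c with
                 | some v => 5 * score + v
                 | none => score) 0]) from ?_, ih]
      simp only [reduceA_eq]
      rw [PySem.List.slice?_none_none_neg_one]
      simp only [Option.getD_some, List.reverse_reverse, List.any_map, List.any_reverse,
        score_fold_eq]
      have : ((fun b : Bool => b) ∘ fun x => PySem.Dict.contains closersA x)
          = fun c => PySem.Dict.contains closersB c := by
        funext c; simp [contains_eq]
      rw [this]

-- ===== VERDICT (by name: the statement is the Claim_ definition above) =====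
theorem solve_spec : Claim_equal_solve := by
  intro data _ _
  unfold Spec_solve solve solve_alt
  rw [scores_eq data []]
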